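-- pv_equiv track=rewrite | github.com/BioCUCKOO/GPSD | GPSD_integration_prediction.py | seq2OPF10bit
-- ===== SOURCE A (Python) =====
-- def seq2OPF10bit(seq):
--     V_OPF10bit = []
--
--     physicochemical_properties_list = [
--         'FYWH',
--         'DE',
--         'KHR',
--         'NQSDECTKRHYW',
--         'AGCTIVLKHFYWM',
--         'IVL',
--         'ASGC',
--         'KHRDE',
--         'PNDTCAGSV',
--         'P',
--     ]
--
--     for aa in seq:
--         for prop in physicochemical_properties_list:
--             if aa in prop:
--                 V_OPF10bit.append(1)
--             else:
--                 V_OPF10bit.append(0)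
--
--     return V_OPF10bit
-- ===== SOURCE B (Python) =====
-- def seq2OPF10bit(seq):
--     physicochemical_properties_list = [
--         'FYWH',
--         'DE',
--         'KHR',
--         'NQSDECTKRHYW',
--         'AGCTIVLKHFYWM',
--         'IVL',
--         'ASGC',
--         'KHRDE',
--         'PNDTCAGSV',
--         'P',
--     ]
--     # build, once, a table mapping each amino acid to its full 10-bit row
--     table = {}
--     for i, prop in enumerate(physicochemical_properties_list):
--         for aa in prop:
--             row = table.setdefault(aa, [0] * 10)
--             row[i] = 1
--     zeros = [0] * 10
--     out = []
--     for aa in seq: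
--         out.extend(table.get(aa, zeros))
--     return out
-- ===== Notes on version B (the rewrite author's own statement) =====
-- stated objective: faster
-- what changed: Replaces the per-character inner scan over the ten property strings with a bit table built once (amino acid -> full 10-bit row), then a single flat pass over seq extending the output with the looked-up row (all-zeros default).
import Mathlib
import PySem

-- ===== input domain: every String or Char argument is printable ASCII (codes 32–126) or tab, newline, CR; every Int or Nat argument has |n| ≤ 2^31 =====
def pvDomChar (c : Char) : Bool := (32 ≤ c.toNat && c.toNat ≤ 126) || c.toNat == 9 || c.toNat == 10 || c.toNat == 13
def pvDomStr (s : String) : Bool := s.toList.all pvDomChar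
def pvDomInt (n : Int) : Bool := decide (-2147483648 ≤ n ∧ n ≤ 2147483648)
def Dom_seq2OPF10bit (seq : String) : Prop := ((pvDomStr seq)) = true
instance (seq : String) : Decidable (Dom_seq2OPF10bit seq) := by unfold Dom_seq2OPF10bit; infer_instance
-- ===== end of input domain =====

-- B builds the 10-bit row table once and does one flat pass over seq (vs A's per-character scan of all ten property strings).

-- ===== PORT A =====
-- the ten property strings of A
def pvProps : List String :=
  ["FYWH", "DE", "KHR", "NQSDECTKRHYW", "AGCTIVLKHFYWM", "IVL", "ASGC", "KHRDE", "PNDTCAGSV", "P"]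

-- 'aa in prop' with aa a single character is exactly character membership in prop
def seq2OPF10bit (seq : String) : List Int :=
  seq.toList.foldl (fun acc aa =>
    pvProps.foldl (fun acc prop =>
      if prop.toList.contains aa then acc ++ [(1 : Int)] else acc ++ [(0 : Int)]) acc) []

-- ===== PORT B =====
-- table built once: row = table.setdefault(aa, [0]*10); row[i] = 1
def pvTable : PySem.Dict Char (List Int) :=
  (PySem.List.enumerate pvProps).foldl (fun t p =>
    p.2.toList.foldl (fun t aa =>
      t.insert aa ((t.getD aa (List.replicate 10 (0 : Int))).set p.1.toNat 1)) t) PySem.Dict.empty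

def seq2OPF10bit_alt (seq : String) : List Int :=
  seq.toList.foldl (fun out aa => out ++ pvTable.getD aa (List.replicate 10 (0 : Int))) []

-- ===== PRECONDITION & SPEC =====
def Spec_seq2OPF10bit (seq : String) (out : List Int) : Prop := out = seq2OPF10bit_alt seq
instance (seq : String) (out : List Int) : Decidable (Spec_seq2OPF10bit seq out) := by unfold Spec_seq2OPF10bit; infer_instance

-- ===== CLAIM (what is proved, stated in full; the proofs are below) =====
def Claim_equal_seq2OPF10bit : Prop := ∀ (seq : String), Dom_seq2OPF10bit seq → Spec_seq2OPF10bit seq (seq2OPF10bit seq)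

-- ===== LEMMAS AND PROOFS =====

-- all characters appearing in any property string
def pvAllChars : List Char :=
  ['F', 'Y', 'W', 'H', 'D', 'E', 'K', 'R', 'N', 'Q', 'S', 'C', 'T', 'A', 'G', 'I', 'V', 'L', 'M', 'P']

-- A's 10-bit row for a single character
def pvRowA (aa : Char) : List Int :=
  pvProps.map (fun prop => if prop.toList.contains aa then (1 : Int) else 0)

theorem pvFoldlBits (aa : Char) (l : List String) (acc : List Int) :
    l.foldl (fun acc prop =>
      if prop.toList.contains aa then acc ++ [(1 : Int)] else acc ++ [(0 : Int)]) acc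
      = acc ++ l.map (fun prop => if prop.toList.contains aa then (1 : Int) else 0) := by
  induction l generalizing acc with
  | nil => simp
  | cons p rest ih =>
    simp only [List.foldl_cons, List.map_cons]
    rw [ih]
    by_cases hp : p.toList.contains aa = true
    · rw [if_pos hp, if_pos hp]; simp
    · rw [if_neg hp, if_neg hp]; simp

theorem pvA_flatMap (seq : String) : seq2OPF10bit seq = seq.toList.flatMap pvRowA := by
  unfold seq2OPF10bit
  have h : (fun (acc : List Int) (aa : Char) =>
      pvProps.foldl (fun acc prop =>
        if prop.toList.contains aa then acc ++ [(1 : Int)] else acc ++ [(0 : Int)]) acc)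
      = fun acc aa => acc ++ pvRowA aa := by
    funext acc aa; exact pvFoldlBits aa pvProps acc
  rw [h, PySem.List.foldl_append_eq_flatMap]
  simp

theorem pvB_flatMap (seq : String) :
    seq2OPF10bit_alt seq = seq.toList.flatMap (fun aa => pvTable.getD aa (List.replicate 10 (0 : Int))) := by
  unfold seq2OPF10bit_alt
  rw [PySem.List.foldl_append_eq_flatMap]
  simp

set_option maxRecDepth 2000 in
theorem pvKeys_eq : pvTable.keys = pvAllChars := by decide

set_option maxRecDepth 2000 in
set_option maxHeartbeats 1000000 in
theorem pvRow_eq (aa : Char) : pvTable.getD aa (List.replicate 10 (0 : Int)) = pvRowA aa := by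
  by_cases h : aa ∈ pvAllChars
  · fin_cases h <;> decide
  · have hk : pvTable.contains aa = false := by
      rw [PySem.Dict.contains_eq_decide_mem_keys, pvKeys_eq]
      simpa using h
    have hx : ∀ (s : String), s.toList.all (fun x => pvAllChars.contains x) = true →
        s.toList.contains aa = false := by
      intro s hs
      cases hcon : s.toList.contains aa with
      | false => rfl
      | true =>
        have hmem : aa ∈ s.toList := by simpa using hcon
        have : pvAllChars.contains aa = true := List.all_eq_true.mp hs aa hmem
        exact absurd (by simpa using this) h
    rw [PySem.Dict.getD_of_not_contains (h := hk)]
    unfold pvRowA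
    simp only [pvProps, List.map_cons, List.map_nil]
    rw [hx "FYWH" (by decide), hx "DE" (by decide), hx "KHR" (by decide),
        hx "NQSDECTKRHYW" (by decide), hx "AGCTIVLKHFYWM" (by decide), hx "IVL" (by decide),
        hx "ASGC" (by decide), hx "KHRDE" (by decide), hx "PNDTCAGSV" (by decide),
        hx "P" (by decide)]
    decide

-- ===== VERDICT (by name: the statement is the Claim_ definition above) =====
set_option maxRecDepth 2000 in
theorem seq2OPF10bit_spec : Claim_equal_seq2OPF10bit := by
  intro seq _
  unfold Spec_seq2OPF10bit
  rw [pvA_flatMap, pvB_flatMap]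
  exact List.flatMap_congr (fun aa _ => (pvRow_eq aa).symm)
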